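-- pv_equiv track=rewrite | github.com/pypi-data/pypi-mirror-21 | packages/tstk/tstk-0.3.1.tar.gz/tstk-0.3.1/tstk/filterset.py | filter_boyer
-- ===== SOURCE A (Python) =====
-- def filter_boyer(filter_seq,target_seqs,target_seqs_flat,target_seqs_flat_divs,only3p):
--     import bisect
--
--     matched_target_seqs = []
--     matched_target_ids = []
--     i = target_seqs_flat.find(filter_seq)
--     while i != -1:
--         p = bisect.bisect_right(target_seqs_flat_divs, i) - 1
--         matched_target_seq = target_seqs[p]
--         if not only3p or matched_target_seq[1].find(filter_seq) == 0:
--             matched_target_seqs.append(matched_target_seq)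
--         i = target_seqs_flat.find(filter_seq, target_seqs_flat_divs[p] + len(matched_target_seq[1]))
--
--     return matched_target_seqs
-- ===== SOURCE B (Python) =====
-- def filter_boyer(filter_seq, target_seqs, target_seqs_flat, target_seqs_flat_divs, only3p):
--     matched_target_seqs = []
--     for target, div in zip(target_seqs, target_seqs_flat_divs):
--         pos = target_seqs_flat.find(filter_seq, div)
--         if pos != -1 and pos < div + len(target[1]):
--             if not only3p or target[1].startswith(filter_seq):
--                 matched_target_seqs.append(target)
--     return matched_target_seqs
-- ===== Notes on version B (the rewrite author's own statement) =====
-- stated objective: simpler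
-- what changed: Replaces the while-find/bisect_right/skip loop (find next occurrence in the flat string, map it back to its owning target with bisect, jump past that target's region) by one plain pass over zip(target_seqs, target_seqs_flat_divs) that, for each target, finds the first occurrence at or after its region start and keeps the target iff that occurrence starts inside its region; bisect and the jump logic disappear.
-- outside the precondition, e.g. on filter_boyer('', [('x', 'a')], 'a', [5], False): A returns [('x', 'a')], B returns []; on filter_boyer('a', [('x', 'b')], 'a', [1], False): A returns [('x', 'b')], B returns []
import Mathlib
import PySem

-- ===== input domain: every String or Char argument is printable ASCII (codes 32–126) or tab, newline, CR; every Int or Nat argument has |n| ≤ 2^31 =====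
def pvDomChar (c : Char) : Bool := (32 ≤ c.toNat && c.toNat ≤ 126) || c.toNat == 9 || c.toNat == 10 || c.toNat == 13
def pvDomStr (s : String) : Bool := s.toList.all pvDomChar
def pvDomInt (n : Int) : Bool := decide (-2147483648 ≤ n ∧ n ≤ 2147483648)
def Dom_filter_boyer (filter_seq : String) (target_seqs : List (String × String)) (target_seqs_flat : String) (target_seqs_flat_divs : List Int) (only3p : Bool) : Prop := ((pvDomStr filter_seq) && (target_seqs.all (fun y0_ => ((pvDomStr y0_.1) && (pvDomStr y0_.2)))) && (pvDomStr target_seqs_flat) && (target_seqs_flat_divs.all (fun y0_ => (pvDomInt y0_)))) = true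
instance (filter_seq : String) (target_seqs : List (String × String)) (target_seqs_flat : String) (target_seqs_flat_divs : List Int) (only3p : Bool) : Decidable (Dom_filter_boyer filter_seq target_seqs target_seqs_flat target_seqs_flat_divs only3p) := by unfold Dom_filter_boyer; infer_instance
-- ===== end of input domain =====

-- B replaces A's while-find/bisect_right/skip glue by one plain pass over zip(target_seqs, divs),
-- keeping each target iff the first occurrence at or after its region start lies inside its region
-- (objective: simpler; same results on Pre_, which states the flat/divs consistency A's bisect logic relies on).

-- ===== PORT A =====
-- A's while loop, totalised with fuel (Python has no bound; inside Pre_ the loop makes at most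
-- len(flat)+1 iterations, see the proofs below). 'none' from pyGet? is Python's IndexError (outside Pre_).
def pvLoopA (filter_seq : String) (target_seqs : List (String × String)) (target_seqs_flat : String) (target_seqs_flat_divs : List Int) (only3p : Bool) : Nat → Int → List (String × String) → List (String × String)
  | 0, _, acc => acc
  | fuel+1, i, acc =>
    if i ≠ -1 then
      let p : Int := (PySem.List.bisectRight target_seqs_flat_divs i : Int) - 1
      match PySem.List.pyGet? target_seqs p with
      | none => acc   -- IndexError in Python
      | some mts =>
        let acc' := if (!only3p) || (PySem.Str.find mts.2 filter_seq == 0) then acc ++ [mts] else acc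
        match PySem.List.pyGet? target_seqs_flat_divs p with
        | none => acc'  -- IndexError in Python
        | some d =>
          pvLoopA filter_seq target_seqs target_seqs_flat target_seqs_flat_divs only3p fuel
            (PySem.Str.findFrom target_seqs_flat filter_seq (d + PySem.Str.len mts.2)) acc'
    else acc

def filter_boyer (filter_seq : String) (target_seqs : List (String × String)) (target_seqs_flat : String) (target_seqs_flat_divs : List Int) (only3p : Bool) : List (String × String) :=
  -- matched_target_ids in the Python is dead code and is not ported
  pvLoopA filter_seq target_seqs target_seqs_flat target_seqs_flat_divs only3p
    (target_seqs_flat.toList.length + 1)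
    (PySem.Str.find target_seqs_flat filter_seq) []

-- ===== PORT B =====
def filter_boyer_alt (filter_seq : String) (target_seqs : List (String × String)) (target_seqs_flat : String) (target_seqs_flat_divs : List Int) (only3p : Bool) : List (String × String) :=
  (target_seqs.zip target_seqs_flat_divs).foldl (fun res td =>
    let pos := PySem.Str.findFrom target_seqs_flat filter_seq td.2
    if pos != -1 && decide (pos < td.2 + PySem.Str.len td.1.2) then
      (if (!only3p) || PySem.Str.startswith td.1.2 filter_seq then res ++ [td.1] else res)
    else res) []

-- ===== PRECONDITION & SPEC =====
-- cumulative region starts: divs[p] = total length of the first p target sequences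
def pvDivs (target_seqs : List (String × String)) : List Int :=
  (List.range target_seqs.length).map
    (fun p => ((target_seqs.take p).map (fun t => PySem.Str.len t.2)).sum)

-- Pre_ excludes the empty filter (A may diverge or raise there) and, when the filter does occur in the
-- flat string, inputs whose flat/divs are NOT the concatenation and cumulative offsets of target_seqs
-- (the callers' invariant; on inconsistent inputs A's bisect ownership and negative-index wraparound are accidental).
def Pre_filter_boyer (filter_seq : String) (target_seqs : List (String × String)) (target_seqs_flat : String) (target_seqs_flat_divs : List Int) (only3p : Bool) : Prop :=
  filter_seq ≠ "" ∧
  ((target_seqs_flat.toList = (target_seqs.map (fun t => t.2.toList)).flatten ∧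
    target_seqs_flat_divs = pvDivs target_seqs) ∨
   PySem.Str.isIn filter_seq target_seqs_flat = false)
instance (filter_seq : String) (target_seqs : List (String × String)) (target_seqs_flat : String) (target_seqs_flat_divs : List Int) (only3p : Bool) : Decidable (Pre_filter_boyer filter_seq target_seqs target_seqs_flat target_seqs_flat_divs only3p) := by unfold Pre_filter_boyer; infer_instance

def pvWitness_filter_boyer : String × (List (String × String)) × String × List Int × Bool :=
  ("a", [("x", "ab"), ("y", "ca")], "abca", [0, 2], false)

def Spec_filter_boyer (filter_seq : String) (target_seqs : List (String × String)) (target_seqs_flat : String) (target_seqs_flat_divs : List Int) (only3p : Bool) (out : List (String × String)) : Prop := out = filter_boyer_alt filter_seq target_seqs target_seqs_flat target_seqs_flat_divs only3p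
instance (filter_seq : String) (target_seqs : List (String × String)) (target_seqs_flat : String) (target_seqs_flat_divs : List Int) (only3p : Bool) (out : List (String × String)) : Decidable (Spec_filter_boyer filter_seq target_seqs target_seqs_flat target_seqs_flat_divs only3p out) := by unfold Spec_filter_boyer; infer_instance

-- ===== CLAIM (what is proved, stated in full; the proofs are below) =====
def Claim_equal_filter_boyer : Prop := ∀ (filter_seq : String) (target_seqs : List (String × String)) (target_seqs_flat : String) (target_seqs_flat_divs : List Int) (only3p : Bool), Dom_filter_boyer filter_seq target_seqs target_seqs_flat target_seqs_flat_divs only3p → Pre_filter_boyer filter_seq target_seqs target_seqs_flat target_seqs_flat_divs only3p → Spec_filter_boyer filter_seq target_seqs target_seqs_flat target_seqs_flat_divs only3p (filter_boyer filter_seq target_seqs target_seqs_flat target_seqs_flat_divs only3p)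

-- ===== LEMMAS AND PROOFS =====

-- nat-valued cumulative lengths
def pvD (ts : List (String × String)) (p : Nat) : Nat :=
  ((ts.take p).map (fun t => t.2.toList.length)).sum

theorem pvD_zero (ts : List (String × String)) : pvD ts 0 = 0 := by
  simp [pvD]

theorem pvD_succ (ts : List (String × String)) (p : Nat) (hp : p < ts.length) :
    pvD ts (p+1) = pvD ts p + ts[p].2.toList.length := by
  have h : (List.take (p+1) (ts.map (fun t => t.2.toList.length))).sum
      = (List.take p (ts.map (fun t => t.2.toList.length))).sum + (ts.map (fun t => t.2.toList.length))[p]'(by simpa using hp) := by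
    exact List.sum_take_succ _ p (by simpa using hp)
  simpa [pvD, List.map_take] using h

theorem pvD_mono (ts : List (String × String)) {p q : Nat} (h : p ≤ q) :
    pvD ts p ≤ pvD ts q := by
  unfold pvD
  have hsplit : ts.take q = ts.take p ++ (List.drop p (ts.take q)) := by
    conv_lhs => rw [← List.take_append_drop p (ts.take q)]
    rw [List.take_take, Nat.min_eq_left h]
  rw [hsplit]
  simp

theorem pvD_length (ts : List (String × String)) :
    pvD ts ts.length = ((ts.map (fun t => t.2.toList)).flatten).length := by
  simp [pvD, List.length_flatten, Function.comp_def]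

theorem pvDivs_length (ts : List (String × String)) : (pvDivs ts).length = ts.length := by
  simp [pvDivs]

theorem pvDivs_getElem (ts : List (String × String)) (p : Nat) (hp : p < ts.length) :
    (pvDivs ts)[p]'(by simp [pvDivs_length, hp]) = (pvD ts p : Int) := by
  have key : ∀ (l : List (String × String)),
      (l.map (fun t => PySem.Str.len t.2)).sum = (l.map (fun t => (t.2.toList.length : Int))).sum := by
    intro l
    induction l with
    | nil => simp
    | cons hd tl ih => simp [PySem.Str.len_eq]
  simp only [pvDivs, List.getElem_map, List.getElem_range, pvD]
  rw [Nat.cast_list_sum, List.map_map]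
  exact key (ts.take p)

theorem pvDivs_sorted (ts : List (String × String)) :
    List.Pairwise (fun a b => a ≤ b) (pvDivs ts) := by
  rw [List.pairwise_iff_getElem]
  intro i j hi hj hij
  have hi' : i < ts.length := by simpa [pvDivs_length] using hi
  have hj' : j < ts.length := by simpa [pvDivs_length] using hj
  rw [pvDivs_getElem ts i hi', pvDivs_getElem ts j hj']
  exact_mod_cast pvD_mono ts (Nat.le_of_lt hij)

-- find = 0 iff prefix
theorem pvFind_eq_zero_iff (s f : List Char) : (PySem.Chars.find s f = 0) ↔ f <+: s := by
  constructor
  · intro h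
    have h0 : 0 ≤ PySem.Chars.find s f := by omega
    have := (PySem.Chars.find_spec h0).1
    simpa [h] using this
  · intro h
    have h0 : 0 ≤ PySem.Chars.find s f := (PySem.Chars.find_nonneg_iff s f).2 h.isInfix
    rcases PySem.Chars.find_spec h0 with ⟨_, hmin⟩
    by_contra hne
    have hpos : 0 < (PySem.Chars.find s f).toNat := by omega
    exact hmin 0 hpos (by simpa using h)

-- findFrom with an arbitrary Int start is -1 when f occurs nowhere in s
theorem pvFindFrom_neg (s f : List Char) (st : Int) (h : ¬ f <:+: s) :
    PySem.Chars.findFrom s f st none = -1 := by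
  have hno : ∀ (k : Nat), PySem.Chars.find (List.drop k s) f = -1 := by
    intro k
    rw [PySem.Chars.find_eq_neg_one_iff]
    intro hin
    exact h (hin.trans (List.drop_suffix k s).isInfix)
  have hno' : ∀ (j : Int), PySem.Chars.find (List.drop j.toNat (List.take s.length s)) f = -1 := by
    intro j; rw [List.take_length]; exact hno _
  unfold PySem.Chars.findFrom
  simp only [Int.toNat_natCast, hno']
  simp

-- case analysis for findFrom at a nat start
theorem pvFindFrom_cases (s f : List Char) (k : Nat) (hk : k ≤ s.length) :
    (PySem.Chars.findFrom s f (k : Int) none = -1 ∧ ∀ j, k ≤ j → ¬ f <+: s.drop j) ∨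
    (∃ i : Nat, PySem.Chars.findFrom s f (k : Int) none = (i : Int) ∧ k ≤ i ∧ f <+: s.drop i ∧
      ∀ j, k ≤ j → j < i → ¬ f <+: s.drop j) := by
  by_cases hneg : PySem.Chars.findFrom s f (k : Int) none = -1
  · left
    refine ⟨hneg, ?_⟩
    intro j hj hpre
    rw [PySem.Chars.findFrom_natCast_eq_neg_one_iff s f k hk] at hneg
    apply hneg
    have hdd : f <+: List.drop (j - k) (List.drop k s) := by
      rwa [List.drop_drop, Nat.add_sub_cancel' hj]
    exact (hdd.isInfix).trans (List.drop_suffix _ _).isInfix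
  · right
    obtain ⟨hge, hpre, hmin⟩ := PySem.Chars.findFrom_natCast_spec s f k hk hneg
    refine ⟨(PySem.Chars.findFrom s f (k : Int) none).toNat, ?_, ?_, hpre, ?_⟩
    · omega
    · omega
    · intro j hj hji
      exact hmin j hj hji

theorem pvOcc_lt_length {s f : List Char} {i : Nat} (hf : f ≠ []) (h : f <+: s.drop i) :
    i < s.length := by
  have h1 : f.length ≤ (s.drop i).length := h.length_le
  have h2 : 0 < f.length := List.length_pos_iff.2 hf
  simp [List.length_drop] at h1
  omega

-- bisect_right identification
theorem pvBisect_eq (divs : List Int) (i : Int) (q : Nat) (hq : q < divs.length)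
    (hsorted : List.Pairwise (fun a b => a ≤ b) divs)
    (hle : divs[q] ≤ i) (hgt : ∀ j (hj : j < divs.length), q < j → i < divs[j]) :
    PySem.List.bisectRight divs i = q + 1 := by
  obtain ⟨hlen, hlo, hhi⟩ := PySem.List.bisectRight_spec divs i hsorted
  set r := PySem.List.bisectRight divs i with hr
  by_contra hne
  rcases Nat.lt_or_ge r (q+1) with hlt | hge
  · have := hhi q hq (by omega)
    omega
  · have hq1 : q + 1 < divs.length := by omega
    have h1 := hlo (q+1) hq1 (by omega)
    have h2 := hgt (q+1) hq1 (by omega)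
    omega

-- skipping a stretch of indices on which pred is false
theorem pvFilter_drop {α : Type} (l : List α) (pred : α → Bool) (k q : Nat) (hk : k ≤ q)
    (hq : q ≤ l.length) (h : ∀ p (hp : p < l.length), k ≤ p → p < q → pred l[p] = false) :
    (l.drop k).filter pred = (l.drop q).filter pred := by
  induction' hd : q - k with d ih generalizing k
  · have hkq : k = q := by omega
    subst hkq; rfl
  · have hkl : k < l.length := by omega
    rw [List.drop_eq_getElem_cons hkl, List.filter_cons, h k hkl le_rfl (by omega)]
    exact ih (k+1) (by omega) (fun p hp h1 h2 => h p hp (by omega) h2) (by omega)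

theorem pvFoldl_nested {α β : Type} (c1 c2 : α → Bool) (g : α → β) (l : List α) (acc : List β) :
    l.foldl (fun res x => if c1 x then (if c2 x then res ++ [g x] else res) else res) acc
      = acc ++ (l.filter (fun x => c1 x && c2 x)).map g := by
  have hstep : (fun (res : List β) x => if c1 x then (if c2 x then res ++ [g x] else res) else res)
      = (fun (res : List β) x => if (c1 x && c2 x) then res ++ [g x] else res) := by
    funext res x
    by_cases h1 : c1 x <;> by_cases h2 : c2 x <;> simp [h1, h2]
  rw [hstep, PySem.List.foldl_append_if]

-- B's kept-condition on a (target, region-start) pair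
def pvPredB (filter_seq target_seqs_flat : String) (only3p : Bool) (td : (String × String) × Int) : Bool :=
  (PySem.Str.findFrom target_seqs_flat filter_seq td.2 != -1 &&
   decide (PySem.Str.findFrom target_seqs_flat filter_seq td.2 < td.2 + PySem.Str.len td.1.2)) &&
  ((!only3p) || PySem.Str.startswith td.1.2 filter_seq)

-- B as filter-map
theorem pvAlt_eq (filter_seq : String) (target_seqs : List (String × String)) (target_seqs_flat : String) (target_seqs_flat_divs : List Int) (only3p : Bool) :
    filter_boyer_alt filter_seq target_seqs target_seqs_flat target_seqs_flat_divs only3p =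
    ((target_seqs.zip target_seqs_flat_divs).filter (pvPredB filter_seq target_seqs_flat only3p)).map Prod.fst := by
  unfold filter_boyer_alt pvPredB
  exact pvFoldl_nested _ _ _ _ _

-- the region owning position i: largest q with pvD q ≤ i
theorem pvOwner (ts : List (String × String)) (i : Nat) (hn0 : ts.length ≠ 0)
    (hi : i < pvD ts ts.length) :
    ∃ q, q < ts.length ∧ pvD ts q ≤ i ∧ i < pvD ts (q+1) ∧
      ∀ j, j ≤ ts.length → q < j → i < pvD ts j := by
  refine ⟨Nat.findGreatest (fun p => pvD ts p ≤ i) (ts.length - 1), ?_, ?_, ?_, ?_⟩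
  · have := Nat.findGreatest_le (P := fun p => pvD ts p ≤ i) (ts.length - 1)
    omega
  · exact Nat.findGreatest_spec (P := fun p => pvD ts p ≤ i) (m := 0) (Nat.zero_le _)
      (by show pvD ts 0 ≤ i; rw [pvD_zero]; exact Nat.zero_le i)
  · rcases Nat.lt_or_ge (ts.length - 1) (Nat.findGreatest (fun p => pvD ts p ≤ i) (ts.length - 1) + 1) with h1 | h1
    · have hq := Nat.findGreatest_le (P := fun p => pvD ts p ≤ i) (ts.length - 1)
      have heq : Nat.findGreatest (fun p => pvD ts p ≤ i) (ts.length - 1) + 1 = ts.length := by omega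
      rw [heq]
      exact hi
    · by_contra h2
      have h3 : pvD ts (Nat.findGreatest (fun p => pvD ts p ≤ i) (ts.length - 1) + 1) ≤ i := by omega
      exact Nat.findGreatest_is_greatest (P := fun p => pvD ts p ≤ i) (by omega) h1 h3
  · intro j hj h1
    rcases Nat.lt_or_ge (ts.length - 1) j with h2 | h2
    · have hjeq : j = ts.length := by omega
      rw [hjeq]
      exact hi
    · by_contra h3
      exact Nat.findGreatest_is_greatest (P := fun p => pvD ts p ≤ i) h1 h2 (by omega)

-- main loop invariant
theorem pvLoop_eq (filter_seq : String) (target_seqs : List (String × String)) (target_seqs_flat : String) (only3p : Bool)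
    (hf : filter_seq.toList ≠ [])
    (hs : target_seqs_flat.toList = (target_seqs.map (fun t => t.2.toList)).flatten) :
    ∀ (fuel k s0 : Nat) (acc : List (String × String)),
      k ≤ target_seqs.length → s0 ≤ pvD target_seqs k →
      (∀ j, s0 ≤ j → j < pvD target_seqs k → ¬ filter_seq.toList <+: target_seqs_flat.toList.drop j) →
      target_seqs_flat.toList.length + 1 ≤ fuel + s0 →
      pvLoopA filter_seq target_seqs target_seqs_flat (pvDivs target_seqs) only3p fuel
        (PySem.Chars.findFrom target_seqs_flat.toList filter_seq.toList (s0 : Int) none) acc =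
      acc ++ (((target_seqs.zip (pvDivs target_seqs)).drop k).filter
                (pvPredB filter_seq target_seqs_flat only3p)).map Prod.fst := by
  intro fuel
  induction fuel with
  | zero =>
    intro k s0 acc hk hs0 hgap hfuel
    exfalso
    have h1 : pvD target_seqs k ≤ pvD target_seqs target_seqs.length := pvD_mono _ hk
    have h2 : pvD target_seqs target_seqs.length = target_seqs_flat.toList.length := by
      rw [pvD_length, hs]
    omega
  | succ fuel ih =>
    intro k s0 acc hk hs0 hgap hfuel
    have hlen : target_seqs_flat.toList.length = pvD target_seqs target_seqs.length := by
      rw [pvD_length, hs]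
    have hs0len : s0 ≤ target_seqs_flat.toList.length := by
      have := pvD_mono target_seqs hk
      omega
    have hziplen : (target_seqs.zip (pvDivs target_seqs)).length = target_seqs.length := by
      simp [pvDivs_length]
    rcases pvFindFrom_cases target_seqs_flat.toList filter_seq.toList s0 hs0len with
      ⟨hneg, hnone⟩ | ⟨i, heq, hges0, hocc, hmin⟩
    · -- no occurrence at or after s0: A stops, B keeps nothing from index k on
      rw [hneg]
      rw [show pvLoopA filter_seq target_seqs target_seqs_flat (pvDivs target_seqs) only3p (fuel+1) (-1) acc = acc by simp [pvLoopA]]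
      have hfk := pvFilter_drop (target_seqs.zip (pvDivs target_seqs))
        (pvPredB filter_seq target_seqs_flat only3p) k target_seqs.length hk (by omega) (by
          intro p hp h1 h2
          have hp' : p < target_seqs.length := by omega
          have hzp : (target_seqs.zip (pvDivs target_seqs))[p] = (target_seqs[p], ((pvD target_seqs p : Nat) : Int)) := by
            rw [List.getElem_zip]
            rw [pvDivs_getElem _ _ hp']
          rw [hzp]
          have hDple : pvD target_seqs p ≤ target_seqs_flat.toList.length := by
            have := pvD_mono target_seqs (Nat.le_of_lt hp')
            omega
          have hfneg : PySem.Chars.findFrom target_seqs_flat.toList filter_seq.toList ((pvD target_seqs p : Nat) : Int) none = -1 := by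
            rcases pvFindFrom_cases target_seqs_flat.toList filter_seq.toList (pvD target_seqs p) hDple with
              ⟨hn', _⟩ | ⟨i', he', hge', hocc', _⟩
            · exact hn'
            · refine absurd hocc' (hnone i' ?_)
              have := pvD_mono target_seqs (show k ≤ p by omega)
              omega
          simp only [pvPredB, PySem.Str.findFrom_eq, hfneg]
          simp)
      rw [hfk, List.drop_eq_nil_of_le (by omega)]
      simp
    · -- first occurrence at or after s0 is i
      have hiD : pvD target_seqs k ≤ i := by
        by_contra hlt
        exact hgap i hges0 (by omega) hocc
      have hilen : i < target_seqs_flat.toList.length :=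
        pvOcc_lt_length hf hocc
      have hn0 : target_seqs.length ≠ 0 := by
        intro h0
        rw [h0] at hlen
        rw [pvD_zero] at hlen
        omega
      obtain ⟨q, hqlt, hqP, hq1, hqgt⟩ := pvOwner target_seqs i hn0 (by omega)
      have hsucc : pvD target_seqs (q+1) = pvD target_seqs q + target_seqs[q].2.toList.length :=
        pvD_succ _ _ hqlt
      -- evaluate one step of A's loop
      rw [heq]
      have hine : ((i : Int)) ≠ -1 := by omega
      have hbis : PySem.List.bisectRight (pvDivs target_seqs) (i : Int) = q + 1 := by
        apply pvBisect_eq _ _ q (by rw [pvDivs_length]; exact hqlt) (pvDivs_sorted _)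
        · rw [pvDivs_getElem _ _ hqlt]
          exact_mod_cast hqP
        · intro j hj h1
          have hj' : j < target_seqs.length := by rwa [pvDivs_length] at hj
          rw [pvDivs_getElem _ _ hj']
          have := hqgt j (by omega) h1
          exact_mod_cast this
      have hcast : ((q + 1 : Nat) : Int) - 1 = ((q : Nat) : Int) := by push_cast; ring
      have hget1 : PySem.List.pyGet? target_seqs ((q:Nat) : Int) = some (target_seqs[q]) := by
        rw [PySem.List.pyGet?_natCast, List.getElem?_eq_getElem hqlt]
      have hget2 : PySem.List.pyGet? (pvDivs target_seqs) ((q:Nat) : Int) = some ((pvD target_seqs q : Nat) : Int) := by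
        rw [PySem.List.pyGet?_natCast,
            List.getElem?_eq_getElem (by rw [pvDivs_length]; exact hqlt)]
        rw [pvDivs_getElem _ _ hqlt]
      have hnext : ((pvD target_seqs q : Nat) : Int) + PySem.Str.len target_seqs[q].2 = ((pvD target_seqs (q+1) : Nat) : Int) := by
        rw [PySem.Str.len_eq, hsucc]
        push_cast
        ring
      rw [show pvLoopA filter_seq target_seqs target_seqs_flat (pvDivs target_seqs) only3p (fuel+1) ((i:Nat) : Int) acc
            = pvLoopA filter_seq target_seqs target_seqs_flat (pvDivs target_seqs) only3p fuel
                (PySem.Str.findFrom target_seqs_flat filter_seq ((pvD target_seqs (q+1) : Nat) : Int))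
                (if (!only3p) || (PySem.Str.find target_seqs[q].2 filter_seq == 0) then acc ++ [target_seqs[q]] else acc) by
        simp only [pvLoopA, if_pos hine, hbis, hcast, hget1, hget2, hnext]]
      have hDq1len : pvD target_seqs (q+1) ≤ target_seqs_flat.toList.length := by
        have := pvD_mono target_seqs (show q + 1 ≤ target_seqs.length by omega)
        omega
      rw [PySem.Str.findFrom_eq]
      have hcgap : ∀ j, pvD target_seqs (q+1) ≤ j → j < pvD target_seqs (q+1) →
          ¬ filter_seq.toList <+: target_seqs_flat.toList.drop j :=
        fun j hj1 hj2 => absurd (lt_of_le_of_lt hj1 hj2) (lt_irrefl _)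
      rw [ih (q+1) (pvD target_seqs (q+1)) _ (by omega) le_rfl hcgap (by omega)]
      -- the first occurrence seen from any region start between k and q is i
      have hfindp : ∀ p, k ≤ p → p ≤ q →
          PySem.Chars.findFrom target_seqs_flat.toList filter_seq.toList ((pvD target_seqs p : Nat) : Int) none = ((i:Nat) : Int) := by
        intro p h1 h2
        have hDp : pvD target_seqs p ≤ i := le_trans (pvD_mono _ h2) hqP
        have hDple : pvD target_seqs p ≤ target_seqs_flat.toList.length := by omega
        rcases pvFindFrom_cases target_seqs_flat.toList filter_seq.toList (pvD target_seqs p) hDple with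
          ⟨hn', hnone'⟩ | ⟨i', he', hge', hocc', hmin'⟩
        · exact absurd hocc (hnone' i hDp)
        · have hi'i : i' = i := by
            by_contra hne'
            rcases Nat.lt_or_ge i' i with hlt | hge2
            · have hs0i' : s0 ≤ i' := by
                have := pvD_mono target_seqs h1
                omega
              exact hmin i' hs0i' hlt hocc'
            · exact hmin' i hDp (by omega) hocc
          rw [he', hi'i]
      -- indices k ≤ p < q are not kept by B
      have hpredfalse : ∀ p (hp : p < (target_seqs.zip (pvDivs target_seqs)).length), k ≤ p → p < q →
          pvPredB filter_seq target_seqs_flat only3p ((target_seqs.zip (pvDivs target_seqs))[p]) = false := by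
        intro p hp h1 h2
        have hp' : p < target_seqs.length := by omega
        have hzp : ((target_seqs.zip (pvDivs target_seqs))[p]) = (target_seqs[p], ((pvD target_seqs p : Nat) : Int)) := by
          rw [List.getElem_zip]
          rw [pvDivs_getElem _ _ hp']
        rw [hzp]
        simp only [pvPredB, PySem.Str.findFrom_eq, hfindp p h1 (by omega)]
        have hge3 : pvD target_seqs (p+1) ≤ i := le_trans (pvD_mono _ (by omega : p + 1 ≤ q)) hqP
        have hlen3 : pvD target_seqs (p+1) = pvD target_seqs p + target_seqs[p].2.toList.length :=
          pvD_succ _ _ hp'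
        have hll : target_seqs[p].2.toList.length = target_seqs[p].2.length := by simp
        have hnotlt : ¬ (((i:Nat) : Int) < ((pvD target_seqs p : Nat) : Int) + PySem.Str.len (target_seqs[p].2)) := by
          rw [PySem.Str.len_eq]
          omega
        simp only [hnotlt]
        simp
      have hkq : k ≤ q := by
        by_contra h3
        have := hqgt k hk (by omega)
        omega
      have hfk := pvFilter_drop (target_seqs.zip (pvDivs target_seqs))
        (pvPredB filter_seq target_seqs_flat only3p) k q hkq (by omega) hpredfalse
      rw [hfk]
      -- index q is kept by B iff the only3p condition holds, same as A's append condition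
      have hzq : ((target_seqs.zip (pvDivs target_seqs))[q]'(by omega)) = (target_seqs[q], ((pvD target_seqs q : Nat) : Int)) := by
        rw [List.getElem_zip]
        rw [pvDivs_getElem _ _ hqlt]
      rw [List.drop_eq_getElem_cons (by omega : q < (target_seqs.zip (pvDivs target_seqs)).length),
          List.filter_cons, hzq]
      have hc1 : (PySem.Str.findFrom target_seqs_flat filter_seq ((pvD target_seqs q : Nat) : Int) != -1 &&
            decide (PySem.Str.findFrom target_seqs_flat filter_seq ((pvD target_seqs q : Nat) : Int) < ((pvD target_seqs q : Nat) : Int) + PySem.Str.len target_seqs[q].2)) = true := by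
        have hlq : target_seqs[q].2.toList.length = target_seqs[q].2.length := by simp
        simp only [PySem.Str.findFrom_eq, hfindp q (by omega) le_rfl]
        simp
        omega
      have hcond : ((PySem.Str.find target_seqs[q].2 filter_seq == 0) : Bool) = PySem.Str.startswith target_seqs[q].2 filter_seq := by
        rw [PySem.Str.find_eq, PySem.Str.startswith_eq]
        by_cases hpre : filter_seq.toList <+: target_seqs[q].2.toList
        · rw [(pvFind_eq_zero_iff _ _).2 hpre]
          simp [PySem.Chars.startswith, List.isPrefixOf_iff_prefix, hpre]
        · have hne0 : PySem.Chars.find target_seqs[q].2.toList filter_seq.toList ≠ 0 := by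
            intro h0
            exact hpre ((pvFind_eq_zero_iff _ _).1 h0)
          simp only [PySem.Chars.startswith]
          rw [beq_eq_false_iff_ne.mpr hne0,
              Bool.eq_false_iff.mpr (fun hT => hpre (List.isPrefixOf_iff_prefix.1 hT))]
      rw [show pvPredB filter_seq target_seqs_flat only3p (target_seqs[q], ((pvD target_seqs q : Nat) : Int))
            = ((!only3p) || PySem.Str.startswith target_seqs[q].2 filter_seq) by
        simp only [pvPredB]
        rw [hc1]
        simp]
      rw [hcond]
      by_cases h3 : PySem.Str.startswith target_seqs[q].2 filter_seq
      · have h3' : PySem.Chars.startswith target_seqs[q].2.toList filter_seq.toList = true := by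
          rwa [PySem.Str.startswith_eq] at h3
        simp [h3', List.append_assoc]
      · have h3' : PySem.Chars.startswith target_seqs[q].2.toList filter_seq.toList = false := by
          rw [← PySem.Str.startswith_eq]
          exact Bool.eq_false_iff.mpr h3
        rcases Bool.dichotomy only3p with ho | ho
        · simp [ho, List.append_assoc]
        · simp [h3', ho]

-- ===== VERDICT (by name: the statement is the Claim_ definition above) =====
theorem filter_boyer_spec : Claim_equal_filter_boyer := by
  intro filter_seq target_seqs target_seqs_flat target_seqs_flat_divs only3p hDom hPre
  unfold Spec_filter_boyer
  obtain ⟨hne, hcons | hnomatch⟩ := hPre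
  · -- consistent flat/divs
    obtain ⟨hflat, hdivs⟩ := hcons
    subst hdivs
    have hf : filter_seq.toList ≠ [] := by
      simpa [String.toList_eq_nil_iff] using hne
    unfold filter_boyer
    have hfind0 : PySem.Str.find target_seqs_flat filter_seq =
        PySem.Chars.findFrom target_seqs_flat.toList filter_seq.toList (((0:Nat)) : Int) none := by
      rw [PySem.Str.find_eq, Nat.cast_zero, PySem.Chars.findFrom_zero]
    rw [hfind0,
        pvLoop_eq filter_seq target_seqs target_seqs_flat only3p hf hflat
          (target_seqs_flat.toList.length + 1) 0 0 [] (Nat.zero_le _) (Nat.zero_le _)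
          (fun j hj1 hj2 => absurd hj2 (by rw [pvD_zero]; omega)) (by omega),
        pvAlt_eq]
    simp
  · -- the filter occurs nowhere in the flat string: both sides are []
    have hninf : ¬ filter_seq.toList <:+: target_seqs_flat.toList := by
      rw [← PySem.Chars.isIn_iff_infix]
      rw [PySem.Str.isIn_eq] at hnomatch
      simp [hnomatch]
    unfold filter_boyer
    rw [show PySem.Str.find target_seqs_flat filter_seq = -1 by
      rw [PySem.Str.find_eq]
      exact (PySem.Chars.find_eq_neg_one_iff _ _).2 hninf]
    rw [show pvLoopA filter_seq target_seqs target_seqs_flat target_seqs_flat_divs only3p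
          (target_seqs_flat.toList.length + 1) (-1) [] = [] by simp [pvLoopA]]
    rw [pvAlt_eq]
    rw [List.filter_eq_nil_iff.2 (by
      intro td htd
      simp only [pvPredB, PySem.Str.findFrom_eq, pvFindFrom_neg _ _ _ hninf]
      simp)]
    simp
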